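-- pv_equiv track=rewrite | github.com/omarkhaled-auto/agent-team-v18 | src/agent_team_v15/architecture_writer.py | _collect_milestone_sections
-- ===== SOURCE A (Python) =====
-- _MANUAL_NOTES_HEADER = "## Manual notes"
--
-- _ROLLUP_HEADER_PREFIX = "## Milestones "
--
-- def _collect_milestone_sections(lines: list[str]) -> list[tuple[int, int, str]]:
--     """Return list of (start_idx, end_idx_exclusive, milestone_id)."""
--     sections: list[tuple[int, int, str]] = []
--     starts: list[tuple[int, str]] = []
--     for i, line in enumerate(lines):
--         if line.startswith("## Milestone ") and not line.startswith(_ROLLUP_HEADER_PREFIX):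
--             parts = line[len("## Milestone "):].split(" ", 1)
--             mid = parts[0] if parts else ""
--             starts.append((i, mid.strip()))
--     for idx, (start, mid) in enumerate(starts):
--         if idx + 1 < len(starts):
--             end = starts[idx + 1][0]
--         else:
--             # End before Manual notes or at EOF.
--             end = len(lines)
--             for j in range(start + 1, len(lines)):
--                 if lines[j].startswith(_MANUAL_NOTES_HEADER) or lines[j].startswith(_ROLLUP_HEADER_PREFIX):
--                     end = j
--                     break
--         sections.append((start, end, mid))
--     return sections
-- ===== SOURCE B (Python) =====
-- _MANUAL_NOTES_HEADER = "## Manual notes"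
--
-- _ROLLUP_HEADER_PREFIX = "## Milestones "
--
--
-- def _collect_milestone_sections(lines: list[str]) -> list[tuple[int, int, str]]:
--     """Single pass: keep the currently open section and the first note index seen since it opened."""
--     sections: list[tuple[int, int, str]] = []
--     open_sec: tuple[int, str] | None = None
--     note_idx: int | None = None
--     for i, line in enumerate(lines):
--         if line.startswith("## Milestone ") and not line.startswith(_ROLLUP_HEADER_PREFIX):
--             if open_sec is not None:
--                 sections.append((open_sec[0], i, open_sec[1]))
--             open_sec = (i, line[len("## Milestone "):].split(" ", 1)[0].strip())
--             note_idx = None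
--         elif note_idx is None and (
--             line.startswith(_MANUAL_NOTES_HEADER) or line.startswith(_ROLLUP_HEADER_PREFIX)
--         ):
--             note_idx = i
--     if open_sec is not None:
--         sections.append((open_sec[0], note_idx if note_idx is not None else len(lines), open_sec[1]))
--     return sections
-- ===== Notes on version B (the rewrite author's own statement) =====
-- stated objective: alternative
-- what changed: Replaced A's two-phase design (collect all header starts, then a second indexed pass pairing each start with the next and re-scanning the tail for a notes/rollup line) by a single pass over the enumerated lines that keeps the currently open section and the first note index seen since it opened.
import Mathlib
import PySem

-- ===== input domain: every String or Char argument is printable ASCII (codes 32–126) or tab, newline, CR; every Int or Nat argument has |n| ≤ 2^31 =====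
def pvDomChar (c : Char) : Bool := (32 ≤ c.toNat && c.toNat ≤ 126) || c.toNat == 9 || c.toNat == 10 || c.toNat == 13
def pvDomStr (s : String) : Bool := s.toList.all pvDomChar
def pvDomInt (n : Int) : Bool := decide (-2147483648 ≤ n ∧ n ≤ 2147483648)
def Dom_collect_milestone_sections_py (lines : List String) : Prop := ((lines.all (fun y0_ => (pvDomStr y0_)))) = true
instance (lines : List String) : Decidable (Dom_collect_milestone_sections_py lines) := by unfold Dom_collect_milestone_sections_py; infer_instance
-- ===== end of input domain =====

-- B is a single pass keeping the open section and first note index, instead of A's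
-- two-phase collect-starts-then-pair-with-next-and-rescan; same cost, different decomposition.

-- shared literal helpers (both Pythons contain these expressions verbatim)
def pvIsHdr (line : String) : Bool :=
  PySem.Str.startswith line "## Milestone " && !(PySem.Str.startswith line "## Milestones ")

def pvIsNote (line : String) : Bool :=
  PySem.Str.startswith line "## Manual notes" || PySem.Str.startswith line "## Milestones "

-- line[len("## Milestone "):].split(" ", 1)[0] (with Python's "if parts else ''"), then .strip()
def pvMid (line : String) : String :=
  match (PySem.Str.splitMax? (PySem.Str.slice line (some 13) none) " " 1).getD [] with
  | p :: _ => PySem.Str.strip p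
  | [] => ""

-- ===== PORT A =====
-- first loop of A: collect (i, mid) for header lines
def pvStartsA (lines : List String) : List (Int × String) :=
  (PySem.List.enumerate lines 0).foldl
    (fun acc p => if pvIsHdr p.2 then acc ++ [(p.1, pvMid p.2)] else acc) []

-- A's inner for/break loop: first j in range(start+1, len(lines)) with a note/rollup line, else len(lines)
def pvFindEnd (lines : List String) (start : Int) : Int :=
  match (PySem.List.pyRange (start + 1) (PySem.List.len lines) 1).find?
      (fun j => pvIsNote (PySem.List.pyGetD lines j "")) with
  | some j => j
  | none => PySem.List.len lines

-- A's second loop: each start paired with the next start's index (rest's head), the last with pvFindEnd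
def pvSectionsA (lines : List String) : List (Int × String) → List (Int × Int × String)
  | [] => []
  | (start, mid) :: rest =>
      (start,
        (match rest with
          | (nxt, _) :: _ => nxt
          | [] => pvFindEnd lines start),
        mid) :: pvSectionsA lines rest

def collect_milestone_sections_py (lines : List String) : List (Int × Int × String) :=
  pvSectionsA lines (pvStartsA lines)

-- ===== PORT B =====
-- one step of B's single pass: state = (sections, open section, first note index since it opened)
def pvStepB (st : List (Int × Int × String) × Option (Int × String) × Option Int)
    (p : Int × String) : List (Int × Int × String) × Option (Int × String) × Option Int :=
  let (secs, op, ni) := st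
  if pvIsHdr p.2 then
    ((match op with
       | some sm => secs ++ [(sm.1, p.1, sm.2)]
       | none => secs),
     some (p.1, pvMid p.2), none)
  else if ni.isNone && pvIsNote p.2 then (secs, op, some p.1)
  else (secs, op, ni)

-- B's trailing "if open_sec is not None: append final section"
def pvFinB (L : Int) (st : List (Int × Int × String) × Option (Int × String) × Option Int) :
    List (Int × Int × String) :=
  match st with
  | (secs, some sm, ni) => secs ++ [(sm.1, ni.getD L, sm.2)]
  | (secs, none, _) => secs

def collect_milestone_sections_py_alt (lines : List String) : List (Int × Int × String) :=
  pvFinB (PySem.List.len lines)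
    ((PySem.List.enumerate lines 0).foldl pvStepB ([], none, none))

-- ===== PRECONDITION & SPEC =====
def Spec_collect_milestone_sections_py (lines : List String) (out : List (Int × Int × String)) : Prop := out = collect_milestone_sections_py_alt lines
instance (lines : List String) (out : List (Int × Int × String)) : Decidable (Spec_collect_milestone_sections_py lines out) := by unfold Spec_collect_milestone_sections_py; infer_instance

-- ===== CLAIM (what is proved, stated in full; the proofs are below) =====
def Claim_equal_collect_milestone_sections_py : Prop := ∀ (lines : List String), Dom_collect_milestone_sections_py lines → Spec_collect_milestone_sections_py lines (collect_milestone_sections_py lines)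

-- ===== LEMMAS AND PROOFS =====

-- header list of the suffix starting at index k
def pvS (k : Nat) : List String → List (Int × String)
  | [] => []
  | y :: ys => if pvIsHdr y then ((k : Int), pvMid y) :: pvS (k + 1) ys else pvS (k + 1) ys

-- first note position inside a list
def pvFN : List String → Option Nat
  | [] => none
  | y :: ys => if pvIsNote y then some 0 else (pvFN ys).map (· + 1)

-- continuation of the output with an open section (s, m), note tracker ni, at index k over suffix xs
def pvCont (L : Int) (s : Int) (m : String) (ni : Option Int) (k : Nat) :
    List String → List (Int × Int × String)
  | [] => [(s, ni.getD L, m)]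
  | y :: ys =>
      if pvIsHdr y then (s, (k : Int), m) :: pvCont L (k : Int) (pvMid y) none (k + 1) ys
      else pvCont L s m (if ni.isNone && pvIsNote y then some (k : Int) else ni) (k + 1) ys

-- continuation with no open section
def pvClosed (L : Int) (k : Nat) : List String → List (Int × Int × String)
  | [] => []
  | y :: ys => if pvIsHdr y then pvCont L (k : Int) (pvMid y) none (k + 1) ys
               else pvClosed L (k + 1) ys

theorem pvStartsA_eq (xs : List String) : ∀ (k : Nat) (acc : List (Int × String)),
    (PySem.List.enumerate xs (k : Int)).foldl
      (fun acc p => if pvIsHdr p.2 then acc ++ [(p.1, pvMid p.2)] else acc) acc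
    = acc ++ pvS k xs := by
  induction xs with
  | nil => intro k acc; simp [pvS, PySem.List.enumerate_nil]
  | cons y ys ih =>
    intro k acc
    have h1 : ((k : Int) + 1) = ((k + 1 : Nat) : Int) := by push_cast; ring
    have ih' : ∀ acc, (PySem.List.enumerate ys ((k : Int) + 1)).foldl
        (fun acc p => if pvIsHdr p.2 then acc ++ [(p.1, pvMid p.2)] else acc) acc
        = acc ++ pvS (k + 1) ys := by intro acc; rw [h1]; exact ih (k + 1) acc
    simp only [PySem.List.enumerate_cons, List.foldl_cons, pvS]
    by_cases h : pvIsHdr y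
    · simp [h, ih']
    · simp [h, ih']

theorem pvFoldB_open (L : Int) (xs : List String) :
    ∀ (k : Nat) (secs : List (Int × Int × String)) (s : Int) (m : String) (ni : Option Int),
    pvFinB L ((PySem.List.enumerate xs (k : Int)).foldl pvStepB (secs, some (s, m), ni))
    = secs ++ pvCont L s m ni k xs := by
  induction xs with
  | nil => intro k secs s m ni; simp [PySem.List.enumerate_nil, pvFinB, pvCont]
  | cons y ys ih =>
    intro k secs s m ni
    have h1 : ((k : Int) + 1) = ((k + 1 : Nat) : Int) := by push_cast; ring
    have ih' : ∀ secs s m ni, pvFinB L ((PySem.List.enumerate ys ((k : Int) + 1)).foldl pvStepB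
        (secs, some (s, m), ni)) = secs ++ pvCont L s m ni (k + 1) ys := by
      intro secs s m ni; rw [h1]; exact ih (k + 1) secs s m ni
    simp only [PySem.List.enumerate_cons, List.foldl_cons, pvCont]
    by_cases h : pvIsHdr y
    · simp [pvStepB, h, ih']
    · by_cases hn : ni.isNone && pvIsNote y
      · simp [pvStepB, h, hn, ih']
      · simp [pvStepB, h, hn, ih']

theorem pvFoldB_closed (L : Int) (xs : List String) :
    ∀ (k : Nat) (secs : List (Int × Int × String)) (ni : Option Int),
    pvFinB L ((PySem.List.enumerate xs (k : Int)).foldl pvStepB (secs, none, ni))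
    = secs ++ pvClosed L k xs := by
  induction xs with
  | nil => intro k secs ni; simp [PySem.List.enumerate_nil, pvFinB, pvClosed]
  | cons y ys ih =>
    intro k secs ni
    have h1 : ((k : Int) + 1) = ((k + 1 : Nat) : Int) := by push_cast; ring
    have ho : ∀ secs s m ni2, pvFinB L ((PySem.List.enumerate ys ((k : Int) + 1)).foldl pvStepB
        (secs, some (s, m), ni2)) = secs ++ pvCont L s m ni2 (k + 1) ys := by
      intro secs s m ni2; rw [h1]; exact pvFoldB_open L ys (k + 1) secs s m ni2
    have ih' : ∀ secs ni2, pvFinB L ((PySem.List.enumerate ys ((k : Int) + 1)).foldl pvStepB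
        (secs, none, ni2)) = secs ++ pvClosed L (k + 1) ys := by
      intro secs ni2; rw [h1]; exact ih (k + 1) secs ni2
    simp only [PySem.List.enumerate_cons, List.foldl_cons, pvClosed]
    by_cases h : pvIsHdr y
    · simp [pvStepB, h, ho]
    · by_cases hn : ni.isNone && pvIsNote y
      · simp [pvStepB, h, hn, ih']
      · simp [pvStepB, h, hn, ih']

-- pvFN over a list extended on the right
theorem pvFN_append_singleton (y : String) : ∀ (a : List String),
    pvFN (a ++ [y]) = match pvFN a with
      | some d => some d
      | none => if pvIsNote y then some a.length else none := by
  intro a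
  induction a with
  | nil => by_cases hy : pvIsNote y <;> simp [pvFN, hy]
  | cons z zs ih =>
    by_cases hz : pvIsNote z
    · simp [pvFN, hz]
    · have hl : pvFN ((z :: zs) ++ [y]) = (pvFN (zs ++ [y])).map (· + 1) := by
        simp [pvFN, hz]
      have hr : pvFN (z :: zs) = (pvFN zs).map (· + 1) := by simp [pvFN, hz]
      rw [hl, ih, hr]
      cases hfn : pvFN zs with
      | some d => simp
      | none => by_cases hy : pvIsNote y <;> simp [hy]

-- A's tail rescan equals the first note position in the dropped suffix
theorem pvFindEnd_eq (lines : List String) : ∀ (n k : Nat), k ≤ lines.length →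
    n = lines.length - k →
    (PySem.List.pyRange (k : Int) (PySem.List.len lines) 1).find?
      (fun j => pvIsNote (PySem.List.pyGetD lines j ""))
    = (pvFN (lines.drop k)).map (fun d => ((k + d : Nat) : Int)) := by
  intro n
  induction n with
  | zero =>
    intro k hk hn
    have hkl : k = lines.length := by omega
    have h0 : (PySem.List.pyRange (k : Int) (PySem.List.len lines) 1) = [] := by
      apply List.eq_nil_of_length_eq_zero
      rw [PySem.List.length_pyRange_one]
      simp [hkl]
    rw [h0]
    simp [hkl, pvFN]
  | succ n ih =>
    intro k hk hn
    have hklt : k < lines.length := by omega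
    have hcons : PySem.List.pyRange (k : Int) (PySem.List.len lines) 1
        = (k : Int) :: PySem.List.pyRange ((k : Int) + 1) (PySem.List.len lines) 1 := by
      apply PySem.List.pyRange_one_cons
      simp only [PySem.List.len_eq]
      exact_mod_cast hklt
    have hdrop : lines.drop k = lines[k] :: lines.drop (k + 1) :=
      List.drop_eq_getElem_cons hklt
    have hget : PySem.List.pyGetD lines (k : Int) "" = lines[k] := by
      rw [PySem.List.pyGetD_natCast]
      exact List.getD_eq_getElem lines "" hklt
    rw [hcons]
    simp only [List.find?_cons, hget, hdrop, pvFN]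
    by_cases hnote : pvIsNote lines[k]
    · simp [hnote]
    · have h1 : ((k : Int) + 1) = ((k + 1 : Nat) : Int) := by push_cast; ring
      rw [if_neg (by simp [hnote]), h1, ih (k + 1) (by omega) (by omega)]
      cases hfn : pvFN (lines.drop (k + 1)) with
      | none => simp [hnote]
      | some d =>
        simp only [hnote, Bool.false_eq_true, if_false, Option.map_map, Option.map_some]
        congr 1
        push_cast
        ring

-- the Option Int tracker that matches B's note_idx for an open section (s, ·) with the scan at k
def pvNI (lines : List String) (s k : Nat) : Option Int :=
  (pvFN ((lines.drop (s + 1)).take (k - (s + 1)))).map (fun d => ((s + 1 + d : Nat) : Int))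

theorem pvSectionsA_cons_cons (lines : List String) (s : Int) (m : String)
    (nxt : Int) (mid : String) (rest : List (Int × String)) :
    pvSectionsA lines ((s, m) :: (nxt, mid) :: rest)
    = (s, nxt, m) :: pvSectionsA lines ((nxt, mid) :: rest) := rfl

theorem pvA_open (lines : List String) (xs : List String) :
    ∀ (k s : Nat) (m : String), lines.drop k = xs → s < k → k ≤ lines.length →
    pvSectionsA lines (((s : Int), m) :: pvS k xs)
    = pvCont (PySem.List.len lines) (s : Int) m (pvNI lines s k) k xs := by
  induction xs with
  | nil =>
    intro k s m hdk hsk hkl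
    have hkeq : k = lines.length := by
      have := List.drop_eq_nil_iff.mp hdk; omega
    have hs1 : s + 1 ≤ lines.length := by omega
    have htake : (lines.drop (s + 1)).take (k - (s + 1)) = lines.drop (s + 1) := by
      apply List.take_of_length_le
      simp [hkeq]
    have hfe : pvFindEnd lines (s : Int)
        = ((pvFN (lines.drop (s + 1))).map (fun d => ((s + 1 + d : Nat) : Int))).getD
            (PySem.List.len lines) := by
      unfold pvFindEnd
      have h1 : ((s : Int) + 1) = ((s + 1 : Nat) : Int) := by push_cast; ring
      rw [h1, pvFindEnd_eq lines (lines.length - (s + 1)) (s + 1) hs1 rfl]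
      cases pvFN (lines.drop (s + 1)) <;> simp
    simp only [pvS, pvSectionsA, pvCont, pvNI, htake, hfe]
  | cons y ys ih =>
    intro k s m hdk hsk hkl
    have hklt : k < lines.length := by
      by_contra h
      rw [List.drop_eq_nil_of_le (by omega)] at hdk
      exact List.cons_ne_nil y ys hdk.symm
    obtain ⟨hy, hys⟩ : y = lines[k] ∧ ys = lines.drop (k + 1) := by
      have h1 := List.drop_eq_getElem_cons hklt
      rw [hdk] at h1
      exact ⟨(List.cons_eq_cons.mp h1).1, (List.cons_eq_cons.mp h1).2⟩
    by_cases h : pvIsHdr y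
    · have hni : pvNI lines k (k + 1) = none := by simp [pvNI, pvFN]
      simp only [pvS, h, if_true, pvCont]
      rw [pvSectionsA_cons_cons, ih (k + 1) k (pvMid y) hys.symm (by omega) (by omega), hni]
    · -- the tracked segment grows by y on the right
      have hseg : (lines.drop (s + 1)).take (k + 1 - (s + 1))
          = (lines.drop (s + 1)).take (k - (s + 1)) ++ [y] := by
        have hidx : (lines.drop (s + 1))[k - (s + 1)]? = some y := by
          rw [List.getElem?_drop]
          have : s + 1 + (k - (s + 1)) = k := by omega
          rw [this, List.getElem?_eq_getElem hklt, ← hy]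
        have : k + 1 - (s + 1) = (k - (s + 1)) + 1 := by omega
        rw [this, List.take_add_one, hidx]
        rfl
      have hlenseg : ((lines.drop (s + 1)).take (k - (s + 1))).length = k - (s + 1) := by
        simp
        omega
      have hni : pvNI lines s (k + 1)
          = if (pvNI lines s k).isNone && pvIsNote y then some (k : Int) else pvNI lines s k := by
        unfold pvNI
        rw [hseg, pvFN_append_singleton]
        cases hfn : pvFN ((lines.drop (s + 1)).take (k - (s + 1))) with
        | some d => simp
        | none =>
          by_cases hnote : pvIsNote y
          · simp only [hnote, Option.map_none, Option.isNone_none, Bool.and_self, if_true,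
              Option.map_some, hlenseg]
            congr 1
            have : s + 1 + (k - (s + 1)) = k := by omega
            exact_mod_cast congrArg (fun (n : Nat) => (n : Int)) this
          · simp [hnote]
      simp only [pvS, h, if_false, Bool.false_eq_true, pvCont]
      rw [ih (k + 1) s m hys.symm (by omega) (by omega), hni]

theorem pvA_closed (lines : List String) (xs : List String) :
    ∀ (k : Nat), lines.drop k = xs → k ≤ lines.length →
    pvSectionsA lines (pvS k xs) = pvClosed (PySem.List.len lines) k xs := by
  induction xs with
  | nil => intro k _ _; simp [pvS, pvSectionsA, pvClosed]
  | cons y ys ih =>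
    intro k hdk hkl
    have hklt : k < lines.length := by
      by_contra h
      rw [List.drop_eq_nil_of_le (by omega)] at hdk
      exact List.cons_ne_nil y ys hdk.symm
    have hys : lines.drop (k + 1) = ys := by
      have h1 := List.drop_eq_getElem_cons hklt
      rw [hdk] at h1
      exact ((List.cons_eq_cons.mp h1).2).symm
    by_cases h : pvIsHdr y
    · have hni : pvNI lines k (k + 1) = none := by simp [pvNI, pvFN]
      simp only [pvS, h, if_true, pvClosed]
      rw [← hni]
      exact pvA_open lines ys (k + 1) k (pvMid y) hys (by omega) (by omega)
    · simp only [pvS, h, if_false, Bool.false_eq_true, pvClosed]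
      exact ih (k + 1) hys (by omega)

-- ===== VERDICT (by name: the statement is the Claim_ definition above) =====
theorem collect_milestone_sections_py_spec : Claim_equal_collect_milestone_sections_py := by
  intro lines _
  unfold Spec_collect_milestone_sections_py
  unfold collect_milestone_sections_py collect_milestone_sections_py_alt pvStartsA
  have h0 : (0 : Int) = ((0 : Nat) : Int) := rfl
  rw [h0, pvStartsA_eq lines 0 [], pvFoldB_closed (PySem.List.len lines) lines 0 [] none]
  simp [pvA_closed lines lines 0 (by simp) (by simp)]
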